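-- pv_equiv track=rewrite | github.com/osu-xai/abp | test/examples/utilities/test_episodes.py | create_episode_boundaries
-- ===== SOURCE A (Python) =====
-- def create_episode_boundaries(raw_data):
--     # divide data up into episodes of length 1,2,3,4... by zeroing out appropriate entries
--     count = 0
--     inserting = 0
--     for d in range(len(raw_data)):
--         if count == inserting:
--             for i in range(len(raw_data[d][0])):
--                 raw_data[d][0][i] = 0
--             inserting = count + 1
--             count = 0
--             continue
--         count += 1
--     return raw_data
-- ===== SOURCE B (Python) =====
-- def create_episode_boundaries(raw_data):
--     # Zero the boundary rows (indices 0, 2, 5, 9, ... with gaps 2,3,4,...) by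
--     # jumping directly between boundary indices instead of scanning every row. Mutates raw_data in place like the original
--     # (the boundary row's first sublist is replaced rather than edited element-wise).
--     b, s = 0, 0
--     while b < len(raw_data):
--         raw_data[b][0] = [0] * len(raw_data[b][0])
--         b += s + 2
--         s += 1
--     return raw_data
-- ===== Notes on version B (the rewrite author's own statement) =====
-- stated objective: alternative
-- what changed: Instead of scanning every row with count/inserting counters, B jumps directly to the boundary indices 0, 2, 5, 9, ... (gap grows by one each time) and zeroes only those rows.
import Mathlib
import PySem

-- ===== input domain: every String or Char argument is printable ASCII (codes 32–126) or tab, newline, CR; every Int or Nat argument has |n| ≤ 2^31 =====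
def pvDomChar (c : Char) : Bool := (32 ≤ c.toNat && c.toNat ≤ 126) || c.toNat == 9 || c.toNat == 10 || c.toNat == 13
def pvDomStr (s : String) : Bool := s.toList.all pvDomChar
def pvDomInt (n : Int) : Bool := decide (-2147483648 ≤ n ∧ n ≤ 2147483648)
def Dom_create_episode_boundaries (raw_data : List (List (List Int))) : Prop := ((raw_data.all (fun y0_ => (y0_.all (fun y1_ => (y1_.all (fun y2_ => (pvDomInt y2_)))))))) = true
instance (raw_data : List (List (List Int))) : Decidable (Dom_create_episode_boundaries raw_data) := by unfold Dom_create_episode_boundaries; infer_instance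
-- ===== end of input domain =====

-- B zeroes only the triangular boundary rows (0,2,5,9,...) by jumping between boundary
-- indices instead of scanning every row with counters (objective: alternative algorithm,
-- not measured faster). Both mutate raw_data in place in Python; equivalence proved is
-- about the return value (B replaces the boundary row's first sublist rather than
-- assigning its elements one by one).


-- ===== PORT A =====
-- loop over the rows carrying A's (count, inserting) state; at a boundary the first
-- sublist of the row is overwritten element-wise with 0 (Python raises IndexError when
-- that row has no sublist — those inputs are outside Pre_; the port keeps the row).
def cebA_go (rs : List (List (List Int))) (count inserting : Int) : List (List (List Int)) :=
  match rs with
  | [] => []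
  | r :: rest =>
    if count = inserting then
      (match r with
       | [] => []                                  -- Python: raw_data[d][0] raises IndexError here
       | x :: xs => (x.map (fun _ => (0 : Int))) :: xs) :: cebA_go rest 0 (count + 1)
    else
      r :: cebA_go rest (count + 1) inserting

def create_episode_boundaries (raw_data : List (List (List Int))) : List (List (List Int)) :=
  cebA_go raw_data 0 0

-- ===== PORT B =====
def zeroRow (r : List (List Int)) : List (List Int) :=
  match r with
  | [] => []                                       -- Python: raw_data[b][0] raises IndexError here
  | x :: xs => List.replicate x.length 0 :: xs

-- B's while loop: b jumps by s+2, s+3, ... ; only the boundary rows are touched.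
def cebB_go (data : List (List (List Int))) (b s : Nat) : List (List (List Int)) :=
  if h : b < data.length then
    cebB_go (data.modify b zeroRow) (b + s + 2) (s + 1)
  else data
termination_by data.length - b
decreasing_by simp only [List.length_modify]; omega

def create_episode_boundaries_alt (raw_data : List (List (List Int))) : List (List (List Int)) :=
  cebB_go raw_data 0 0

-- ===== PRECONDITION & SPEC =====
-- Pre_ excludes exactly the inputs on which Python A raises IndexError: some boundary
-- index k*(k+3)/2 < len(raw_data) whose row has no sublist at all.
def Pre_create_episode_boundaries (raw_data : List (List (List Int))) : Prop :=
  ∀ k < raw_data.length, k * (k + 3) / 2 < raw_data.length →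
    raw_data.getD (k * (k + 3) / 2) [] ≠ []
instance (raw_data : List (List (List Int))) : Decidable (Pre_create_episode_boundaries raw_data) := by
  unfold Pre_create_episode_boundaries; infer_instance

def pvWitness_create_episode_boundaries : List (List (List Int)) := [[[1]], [], [[2, 3]]]

def Spec_create_episode_boundaries (raw_data : List (List (List Int))) (out : List (List (List Int))) : Prop := out = create_episode_boundaries_alt raw_data
instance (raw_data : List (List (List Int))) (out : List (List (List Int))) : Decidable (Spec_create_episode_boundaries raw_data out) := by unfold Spec_create_episode_boundaries; infer_instance

-- ===== CLAIM (what is proved, stated in full; the proofs are below) =====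
def Claim_equal_create_episode_boundaries : Prop := ∀ (raw_data : List (List (List Int))), Dom_create_episode_boundaries raw_data → Pre_create_episode_boundaries raw_data → Spec_create_episode_boundaries raw_data (create_episode_boundaries raw_data)

-- ===== LEMMAS AND PROOFS =====

-- reference form: countdown k to the next boundary, s the index of the last gap used
def zgoB (rs : List (List (List Int))) (k s : Nat) : List (List (List Int)) :=
  match rs, k with
  | [], _ => []
  | r :: rest, 0 => zeroRow r :: zgoB rest (s + 1) (s + 1)
  | r :: rest, k + 1 => r :: zgoB rest k s

lemma cebB_peel_aux (n : Nat) : ∀ (rest : List (List (List Int))) (x : List (List Int)) (b s : Nat),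
    rest.length - b ≤ n → cebB_go (x :: rest) (b + 1) s = x :: cebB_go rest b s := by
  induction n with
  | zero =>
    intro rest x b s h
    conv_lhs => rw [cebB_go]
    conv_rhs => rw [cebB_go]
    rw [dif_neg (by simp only [List.length_cons]; omega), dif_neg (by omega)]
  | succ n ih =>
    intro rest x b s h
    by_cases hb : b < rest.length
    · rw [cebB_go]
      rw [dif_pos (by simp; omega)]
      have hmod : (x :: rest).modify (b + 1) zeroRow = x :: rest.modify b zeroRow := by
        simp [List.modify]
      rw [hmod]
      have : (rest.modify b zeroRow).length - (b + s + 2) ≤ n := by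
        simp only [List.length_modify]; omega
      rw [show b + 1 + s + 2 = (b + s + 2) + 1 by omega, ih _ x _ _ this]
      conv_rhs => rw [cebB_go]
      rw [dif_pos hb]
    · conv_lhs => rw [cebB_go]
      conv_rhs => rw [cebB_go]
      rw [dif_neg (by simp only [List.length_cons]; omega), dif_neg (by omega)]

lemma cebB_peel (rest : List (List (List Int))) (x : List (List Int)) (b s : Nat) :
    cebB_go (x :: rest) (b + 1) s = x :: cebB_go rest b s :=
  cebB_peel_aux (rest.length - b) rest x b s le_rfl

lemma cebB_eq_zgoB : ∀ (rs : List (List (List Int))) (k s : Nat), cebB_go rs k s = zgoB rs k s := by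
  intro rs
  induction rs with
  | nil => intro k s; rw [cebB_go]; simp [zgoB]
  | cons r rest ih =>
    intro k s
    cases k with
    | zero =>
      rw [cebB_go]
      rw [dif_pos (by simp)]
      have hmod : (r :: rest).modify 0 zeroRow = zeroRow r :: rest := by simp [List.modify]
      rw [hmod, show 0 + s + 2 = (s + 1) + 1 by omega, cebB_peel, ih]
      rfl
    | succ k => rw [cebB_peel, ih]; rfl

lemma cebA_eq_zgoB : ∀ (rs : List (List (List Int))) (c i : Int), 0 ≤ c → c ≤ i →
    cebA_go rs c i = zgoB rs (i - c).toNat i.toNat := by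
  intro rs
  induction rs with
  | nil => intro c i _ _; rfl
  | cons r rest ih =>
    intro c i hc hci
    by_cases h : c = i
    · simp only [cebA_go]
      rw [if_pos h]
      have h0 : (i - c).toNat = 0 := by omega
      rw [h0]
      have hz : (match r with
          | [] => ([] : List (List Int))
          | x :: xs => (x.map (fun _ => (0 : Int))) :: xs) = zeroRow r := by
        cases r with
        | nil => rfl
        | cons x xs => simp [zeroRow, List.map_const']
      rw [hz, ih 0 (c + 1) le_rfl (by omega)]
      have h1 : (c + 1 - 0).toNat = i.toNat + 1 := by omega
      have h2 : (c + 1).toNat = i.toNat + 1 := by omega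
      rw [h1, h2]
      rfl
    · simp only [cebA_go]
      rw [if_neg h]
      rw [ih (c + 1) i (by omega) (by omega)]
      have h1 : (i - c).toNat = (i - (c + 1)).toNat + 1 := by omega
      rw [h1]
      rfl

-- ===== VERDICT (by name: the statement is the Claim_ definition above) =====
theorem create_episode_boundaries_spec : Claim_equal_create_episode_boundaries := by
  intro raw_data _ _
  unfold Spec_create_episode_boundaries create_episode_boundaries create_episode_boundaries_alt
  rw [cebA_eq_zgoB raw_data 0 0 le_rfl le_rfl, cebB_eq_zgoB]
  rfl
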